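-- pv_equiv track=rewrite | github.com/nidhiatwork/Python_Coding_Practice | Lists/placeCows.py | canPutCowsWithDist
-- ===== SOURCE A (Python) =====
-- def canPutCowsWithDist(x, C, arr):
--     idx=0
--     while idx<len(arr):
--         C-=1
--         if C==0:
--             return True
--         idx+=x
--     return False
-- ===== SOURCE B (Python) =====
-- def canPutCowsWithDist(x, C, arr):
--     n = len(arr)
--     if C < 1 or n == 0:
--         return False
--     return x <= 0 or (C - 1) * x < n
-- ===== Notes on version B (the rewrite author's own statement) =====
-- stated objective: simpler
-- what changed: Replaced the index-stepping while loop by a closed-form arithmetic test: the loop succeeds iff C>=1 and (C-1)*x < len(arr) (any non-positive step on a nonempty array succeeds).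
import Mathlib
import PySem

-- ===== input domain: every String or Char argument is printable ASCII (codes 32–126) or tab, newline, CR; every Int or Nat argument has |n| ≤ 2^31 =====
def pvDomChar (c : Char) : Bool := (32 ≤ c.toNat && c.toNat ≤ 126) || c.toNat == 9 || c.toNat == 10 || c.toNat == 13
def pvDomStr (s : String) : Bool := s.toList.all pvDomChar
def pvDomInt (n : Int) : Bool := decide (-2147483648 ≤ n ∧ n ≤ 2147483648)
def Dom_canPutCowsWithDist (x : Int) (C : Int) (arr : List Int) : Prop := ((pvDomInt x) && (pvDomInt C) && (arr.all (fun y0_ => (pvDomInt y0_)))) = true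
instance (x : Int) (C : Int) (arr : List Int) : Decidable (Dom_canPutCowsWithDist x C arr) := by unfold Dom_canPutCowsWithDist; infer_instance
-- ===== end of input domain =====

-- B replaces A's index-stepping while loop by a closed-form arithmetic test (simpler);
-- Pre_ excludes only the inputs on which A's while loop never terminates.


-- ===== PORT A =====
-- A's while loop, step for step (state: C, idx).  The loop diverges when x ≤ 0, C < 1
-- and arr ≠ []; those inputs are excluded by Pre_ below, and on every input of Pre_
-- the fuel 'arr.length + C.toNat + 1' exceeds the number of iterations A performs.
def canPutCowsWithDistLoop (x : Int) (len : Int) : Int → Int → Nat → Bool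
  | _, _, 0 => false
  | C, idx, fuel + 1 =>
    if idx < len then
      let C' := C - 1
      if C' = 0 then true
      else canPutCowsWithDistLoop x len C' (idx + x) fuel
    else false

def canPutCowsWithDist (x : Int) (C : Int) (arr : List Int) : Bool :=
  canPutCowsWithDistLoop x (arr.length : Int) C 0 (arr.length + C.toNat + 1)

-- ===== PORT B =====
def canPutCowsWithDist_alt (x : Int) (C : Int) (arr : List Int) : Bool :=
  if C < 1 ∨ (arr.length : Int) = 0 then false
  else decide (x ≤ 0) || decide ((C - 1) * x < (arr.length : Int))

-- ===== PRECONDITION & SPEC =====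
-- Pre_ excludes exactly the inputs (x ≤ 0, C < 1, arr ≠ []) on which A's while loop
-- never terminates; A returns a value everywhere else.
def Pre_canPutCowsWithDist (x : Int) (C : Int) (arr : List Int) : Prop :=
  1 ≤ x ∨ arr = [] ∨ 1 ≤ C
instance (x : Int) (C : Int) (arr : List Int) : Decidable (Pre_canPutCowsWithDist x C arr) := by unfold Pre_canPutCowsWithDist; infer_instance

def pvWitness_canPutCowsWithDist : Int × Int × List Int := (2, 3, [1, 2, 3, 4, 5])

def Spec_canPutCowsWithDist (x : Int) (C : Int) (arr : List Int) (out : Bool) : Prop := out = canPutCowsWithDist_alt x C arr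
instance (x : Int) (C : Int) (arr : List Int) (out : Bool) : Decidable (Spec_canPutCowsWithDist x C arr out) := by unfold Spec_canPutCowsWithDist; infer_instance

-- ===== CLAIM (what is proved, stated in full; the proofs are below) =====
def Claim_equal_canPutCowsWithDist : Prop := ∀ (x : Int) (C : Int) (arr : List Int), Dom_canPutCowsWithDist x C arr → Pre_canPutCowsWithDist x C arr → Spec_canPutCowsWithDist x C arr (canPutCowsWithDist x C arr)

-- ===== LEMMAS AND PROOFS =====

-- Positive step: the loop computes the closed form (relative to the current idx).
theorem loop_pos (x len : Int) (hx : 1 ≤ x) :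
    ∀ (fuel : Nat) (C idx : Int), len - idx ≤ (fuel : Int) →
      canPutCowsWithDistLoop x len C idx fuel
        = decide (1 ≤ C ∧ idx + (C - 1) * x < len) := by
  intro fuel
  induction fuel with
  | zero =>
    intro C idx h
    simp only [canPutCowsWithDistLoop]
    symm
    simp only [decide_eq_false_iff_not]
    rintro ⟨hC, hlt⟩
    have : 0 ≤ (C - 1) * x := mul_nonneg (by omega) (by omega)
    omega
  | succ n ih =>
    intro C idx h
    simp only [canPutCowsWithDistLoop]
    by_cases hidx : idx < len
    · simp only [hidx, if_true]
      by_cases hC1 : C - 1 = 0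
      · simp only [hC1, if_true]
        symm
        simp only [decide_eq_true_iff]
        constructor <;> omega
      · simp only [hC1, if_false]
        rw [ih (C - 1) (idx + x) (by omega)]
        rw [decide_eq_decide]
        have key : (C - 1 - 1) * x = (C - 1) * x - x := by ring
        constructor
        · rintro ⟨h1, h2⟩; exact ⟨by omega, by omega⟩
        · rintro ⟨h1, h2⟩; exact ⟨by omega, by omega⟩
    · simp only [hidx, if_false]
      symm
      simp only [decide_eq_false_iff_not]
      rintro ⟨hC, hlt⟩
      have : 0 ≤ (C - 1) * x := mul_nonneg (by omega) (by omega)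
      omega

-- Non-positive step, at least one cow, nonempty array: the loop succeeds.
theorem loop_nonpos (x len : Int) (hx : x ≤ 0) (hlen : 0 < len) :
    ∀ (fuel : Nat) (C idx : Int), 1 ≤ C → idx ≤ 0 → C.toNat ≤ fuel →
      canPutCowsWithDistLoop x len C idx fuel = true := by
  intro fuel
  induction fuel with
  | zero => intro C idx hC _ hf; omega
  | succ n ih =>
    intro C idx hC hidx hf
    simp only [canPutCowsWithDistLoop]
    have hlt : idx < len := by omega
    simp only [hlt, if_true]
    by_cases hC1 : C - 1 = 0
    · simp [hC1]
    · simp only [hC1, if_false]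
      exact ih (C - 1) (idx + x) (by omega) (by omega) (by omega)

-- ===== VERDICT (by name: the statement is the Claim_ definition above) =====
theorem canPutCowsWithDist_spec : Claim_equal_canPutCowsWithDist := by
  intro x C arr _ hpre
  unfold Spec_canPutCowsWithDist canPutCowsWithDist canPutCowsWithDist_alt
  by_cases hx : 1 ≤ x
  · rw [loop_pos x _ hx _ C 0 (by push_cast; omega)]
    by_cases hcond : C < 1 ∨ (arr.length : Int) = 0
    · rw [if_pos hcond]
      simp only [decide_eq_false_iff_not]
      rintro ⟨h1, h2⟩
      have h0 : 0 ≤ (C - 1) * x := mul_nonneg (by omega) (by omega)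
      rcases hcond with h | h <;> omega
    · rw [if_neg hcond]
      push Not at hcond
      rw [show (decide (x ≤ 0)) = false from decide_eq_false (by omega)]
      rw [Bool.false_or, decide_eq_decide]
      constructor
      · rintro ⟨_, h2⟩; omega
      · intro h2; exact ⟨by omega, by omega⟩
  · by_cases he : arr = []
    · subst he
      rw [if_pos (Or.inr (by simp))]
      simp [canPutCowsWithDistLoop]
    · have hC : 1 ≤ C := by
        rcases hpre with h | h | h
        · omega
        · exact absurd h he
        · exact h
      have hlen : 0 < (arr.length : Int) := by
        have := List.length_pos_iff.mpr he
        omega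
      rw [loop_nonpos x _ (by omega) hlen _ C 0 hC le_rfl (by omega)]
      rw [if_neg (by push Not; exact ⟨by omega, by omega⟩)]
      rw [show (decide (x ≤ 0)) = true from decide_eq_true (by omega)]
      simp
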